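-- pv_equiv track=rewrite | github.com/abhinavm24/Arcturus | core/studio/revision.py | compute_change_summary
-- ===== SOURCE A (Python) =====
-- def compute_change_summary(old_tree: dict | None, new_tree: dict | None) -> str:
--     """Compute a human-readable summary of changes between two content trees.
--
--     Compares top-level keys and reports added, removed, and changed counts.
--     Returns a descriptive string suitable for Revision.change_summary.
--     """
--     if old_tree is None:
--         return "Initial draft"
--     if new_tree is None:
--         return "Content removed"
--
--     old_keys = set(old_tree.keys())
--     new_keys = set(new_tree.keys())
--
--     added = new_keys - old_keys
--     removed = old_keys - new_keys
--     changed = [k for k in old_keys & new_keys if old_tree[k] != new_tree[k]]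
--
--     parts = []
--     if added:
--         parts.append(f"{len(added)} added")
--     if removed:
--         parts.append(f"{len(removed)} removed")
--     if changed:
--         parts.append(f"{len(changed)} changed")
--
--     return ", ".join(parts) if parts else "No changes"
-- ===== SOURCE B (Python) =====
-- def compute_change_summary(old_tree: dict | None, new_tree: dict | None) -> str:
--     """Sort-and-merge re-implementation: sorts the two key lists once and
--     classifies every key in a single two-pointer merge, instead of building
--     sets and taking differences/intersections."""
--     if old_tree is None:
--         return "Initial draft"
--     if new_tree is None:
--         return "Content removed"
--
--     ok = sorted(old_tree)
--     nk = sorted(new_tree)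
--     added = removed = changed = 0
--     i = j = 0
--     while i < len(ok) and j < len(nk):
--         if ok[i] < nk[j]:
--             removed += 1
--             i += 1
--         elif nk[j] < ok[i]:
--             added += 1
--             j += 1
--         else:
--             if old_tree[ok[i]] != new_tree[nk[j]]:
--                 changed += 1
--             i += 1
--             j += 1
--     removed += len(ok) - i
--     added += len(nk) - j
--
--     parts = []
--     if added:
--         parts.append(f"{added} added")
--     if removed:
--         parts.append(f"{removed} removed")
--     if changed:
--         parts.append(f"{changed} changed")
--     return ", ".join(parts) if parts else "No changes"
-- ===== Notes on version B (the rewrite author's own statement) =====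
-- stated objective: alternative
-- what changed: Replaces A's hash-set differences/intersection with sorting the two key lists once and classifying every key as added/removed/changed in a single two-pointer merge of the sorted lists.
import Mathlib
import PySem

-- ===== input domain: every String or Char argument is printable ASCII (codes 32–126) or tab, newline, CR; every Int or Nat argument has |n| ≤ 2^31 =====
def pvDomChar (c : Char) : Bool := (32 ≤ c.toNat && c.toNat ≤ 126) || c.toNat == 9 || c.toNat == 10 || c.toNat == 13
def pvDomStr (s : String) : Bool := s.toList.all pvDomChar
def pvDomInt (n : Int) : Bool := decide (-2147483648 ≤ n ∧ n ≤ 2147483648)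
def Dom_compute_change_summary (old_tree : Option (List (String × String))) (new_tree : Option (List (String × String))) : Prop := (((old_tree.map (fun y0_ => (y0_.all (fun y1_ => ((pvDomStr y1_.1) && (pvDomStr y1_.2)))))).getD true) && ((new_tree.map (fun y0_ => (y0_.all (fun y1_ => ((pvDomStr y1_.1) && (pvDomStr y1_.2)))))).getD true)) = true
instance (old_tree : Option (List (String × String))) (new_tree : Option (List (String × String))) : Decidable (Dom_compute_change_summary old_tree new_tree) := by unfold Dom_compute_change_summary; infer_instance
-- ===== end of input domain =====

-- B replaces A's hash-set differences/intersection by sorting the two key lists once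
-- and classifying every key in a single two-pointer merge (objective: alternative).

-- shared dict-subscript primitive: d[k] on an association list (first match), as Option
def pvLookup (xs : List (String × String)) (k : String) : Option String :=
  (xs.find? (fun p => p.1 == k)).map Prod.snd

-- ===== PORT A =====
def compute_change_summary (old_tree : Option (List (String × String))) (new_tree : Option (List (String × String))) : String :=
  match old_tree with
  | none => "Initial draft"
  | some o =>
    match new_tree with
    | none => "Content removed"
    | some n =>
      let old_keys : PySem.Set String := PySem.Set.ofList (o.map Prod.fst)
      let new_keys : PySem.Set String := PySem.Set.ofList (n.map Prod.fst)
      let added := PySem.Set.diff new_keys old_keys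
      let removed := PySem.Set.diff old_keys new_keys
      let changed := (PySem.Set.inter old_keys new_keys).filter
        (fun k => !(pvLookup o k == pvLookup n k))
      let parts : List String :=
        (if added.length ≠ 0 then [PySem.Int.toStr (added.length : Int) ++ " added"] else []) ++
        (if removed.length ≠ 0 then [PySem.Int.toStr (removed.length : Int) ++ " removed"] else []) ++
        (if changed.length ≠ 0 then [PySem.Int.toStr (changed.length : Int) ++ " changed"] else [])
      if parts ≠ [] then PySem.Str.join ", " parts else "No changes"

-- ===== PORT B =====
-- B's while-loop over indices i, j (plus the two remainder additions after it), as a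
-- recursive two-pointer merge over the sorted key lists; result is (added, removed, changed)
def pvMergeCount (o n : List (String × String)) : List String → List String → Int × Int × Int
  | [], ys => ((ys.length : Int), 0, 0)
  | x :: xs, [] => (0, ((x :: xs).length : Int), 0)
  | x :: xs, y :: ys =>
    if x < y then
      let r := pvMergeCount o n xs (y :: ys)
      (r.1, r.2.1 + 1, r.2.2)
    else if y < x then
      let r := pvMergeCount o n (x :: xs) ys
      (r.1 + 1, r.2.1, r.2.2)
    else
      let r := pvMergeCount o n xs ys
      if !(pvLookup o x == pvLookup n y) then (r.1, r.2.1, r.2.2 + 1) else r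
  termination_by xs ys => xs.length + ys.length

def compute_change_summary_alt (old_tree : Option (List (String × String))) (new_tree : Option (List (String × String))) : String :=
  match old_tree with
  | none => "Initial draft"
  | some o =>
    match new_tree with
    | none => "Content removed"
    | some n =>
      -- sorted(old_tree): the dict's distinct keys (insertion order), sorted
      let ok := PySem.List.sorted (PySem.Set.ofList (o.map Prod.fst)) (fun x => x) false
      let nk := PySem.List.sorted (PySem.Set.ofList (n.map Prod.fst)) (fun x => x) false
      let r := pvMergeCount o n ok nk
      let parts : List String :=
        (if r.1 > 0 then [PySem.Int.toStr r.1 ++ " added"] else []) ++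
        (if r.2.1 > 0 then [PySem.Int.toStr r.2.1 ++ " removed"] else []) ++
        (if r.2.2 > 0 then [PySem.Int.toStr r.2.2 ++ " changed"] else [])
      if parts ≠ [] then PySem.Str.join ", " parts else "No changes"

-- ===== PRECONDITION & SPEC =====
def Spec_compute_change_summary (old_tree : Option (List (String × String))) (new_tree : Option (List (String × String))) (out : String) : Prop := out = compute_change_summary_alt old_tree new_tree
instance (old_tree : Option (List (String × String))) (new_tree : Option (List (String × String))) (out : String) : Decidable (Spec_compute_change_summary old_tree new_tree out) := by unfold Spec_compute_change_summary; infer_instance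

-- ===== CLAIM (what is proved, stated in full; the proofs are below) =====
def Claim_equal_compute_change_summary : Prop := ∀ (old_tree : Option (List (String × String))) (new_tree : Option (List (String × String))), Dom_compute_change_summary old_tree new_tree → Spec_compute_change_summary old_tree new_tree (compute_change_summary old_tree new_tree)

-- ===== LEMMAS AND PROOFS =====

-- countP of a cons whose head fails the predicate, with a rewritten tail
theorem pv_countP_cons_tail {p q : String → Bool} {l : List String} (a : String)
    (hhead : p a = false) (htail : l.countP p = l.countP q) :
    (a :: l).countP p = l.countP q := by
  simp [List.countP_cons, hhead, htail]

-- countP of a cons whose head satisfies the predicate, with a rewritten tail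
theorem pv_countP_cons_tail1 {p q : String → Bool} {l : List String} (a : String)
    (hhead : p a = true) (htail : l.countP p = l.countP q) :
    (a :: l).countP p = l.countP q + 1 := by
  simp [List.countP_cons, hhead, htail]

-- the two-pointer merge on strictly increasing lists computes the three membership counts
theorem pvMergeCount_spec (o n : List (String × String)) (xs ys : List String)
    (hx : xs.Pairwise (· < ·)) (hy : ys.Pairwise (· < ·)) :
    pvMergeCount o n xs ys =
      ((ys.countP (fun k => !xs.contains k) : Int),
       (xs.countP (fun k => !ys.contains k) : Int),
       (xs.countP (fun k => ys.contains k && !(pvLookup o k == pvLookup n k)) : Int)) := by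
  fun_induction pvMergeCount o n xs ys with
  | case1 ys =>
    simp [List.countP_eq_length_filter]
  | case2 x xs =>
    simp [List.countP_eq_length_filter]
  | case3 x xs y ys hlt r ih =>
    have hnot : ∀ k ∈ y :: ys, x < k := by
      intro k hk
      rcases List.mem_cons.mp hk with rfl | hk
      · exact hlt
      · exact lt_trans hlt ((List.pairwise_cons.mp hy).1 k hk)
    have hr : r = _ := ih (List.pairwise_cons.mp hx).2 hy
    have hA : (y :: ys).countP (fun k => !(x :: xs).contains k)
        = (y :: ys).countP (fun k => !xs.contains k) := by
      apply List.countP_congr; intro k hk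
      have hne : k ≠ x := fun h => absurd (h ▸ hnot k hk) (lt_irrefl x)
      simp [hne]
    have hB : (x :: xs).countP (fun k => !(y :: ys).contains k)
        = xs.countP (fun k => !(y :: ys).contains k) + 1 := by
      apply pv_countP_cons_tail1
      · have : x ∉ y :: ys := fun h => lt_irrefl x (hnot x h)
        simpa using this
      · rfl
    have hC : (x :: xs).countP (fun k => (y :: ys).contains k && !(pvLookup o k == pvLookup n k))
        = xs.countP (fun k => (y :: ys).contains k && !(pvLookup o k == pvLookup n k)) := by
      apply pv_countP_cons_tail
      · have : x ∉ y :: ys := fun h => lt_irrefl x (hnot x h)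
        have hc : ((y :: ys).contains x) = false := by simpa using this
        show ((y :: ys).contains x && !(pvLookup o x == pvLookup n x)) = false
        rw [hc, Bool.false_and]
      · rfl
    rw [hr, hA, hB, hC, Prod.mk.injEq, Prod.mk.injEq]
    refine ⟨rfl, ?_, rfl⟩
    push_cast; ring
  | case4 x xs y ys hnlt hlt r ih =>
    have hnot : ∀ k ∈ x :: xs, y < k := by
      intro k hk
      rcases List.mem_cons.mp hk with rfl | hk
      · exact hlt
      · exact lt_trans hlt ((List.pairwise_cons.mp hx).1 k hk)
    have hr : r = _ := ih hx (List.pairwise_cons.mp hy).2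
    have hA : (y :: ys).countP (fun k => !(x :: xs).contains k)
        = ys.countP (fun k => !(x :: xs).contains k) + 1 := by
      apply pv_countP_cons_tail1
      · have : y ∉ x :: xs := fun h => lt_irrefl y (hnot y h)
        simpa using this
      · rfl
    have hB : (x :: xs).countP (fun k => !(y :: ys).contains k)
        = (x :: xs).countP (fun k => !ys.contains k) := by
      apply List.countP_congr; intro k hk
      have hne : k ≠ y := fun h => absurd (h ▸ hnot k hk) (lt_irrefl y)
      simp [hne]
    have hC : (x :: xs).countP (fun k => (y :: ys).contains k && !(pvLookup o k == pvLookup n k))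
        = (x :: xs).countP (fun k => ys.contains k && !(pvLookup o k == pvLookup n k)) := by
      apply List.countP_congr; intro k hk
      have hne : k ≠ y := fun h => absurd (h ▸ hnot k hk) (lt_irrefl y)
      simp [hne]
    rw [hr, hA, hB, hC, Prod.mk.injEq, Prod.mk.injEq]
    refine ⟨?_, rfl, rfl⟩
    push_cast; ring
  | case5 x xs y ys h1 h2 r hneq ih =>
    have heq : x = y := le_antisymm (le_of_not_gt h2) (le_of_not_gt h1)
    subst heq
    have hxtail : ∀ k ∈ xs, x < k := (List.pairwise_cons.mp hx).1
    have hytail : ∀ k ∈ ys, x < k := (List.pairwise_cons.mp hy).1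
    have hr : r = _ := ih (List.pairwise_cons.mp hx).2 (List.pairwise_cons.mp hy).2
    have hA : (x :: ys).countP (fun k => !(x :: xs).contains k)
        = ys.countP (fun k => !xs.contains k) := by
      apply pv_countP_cons_tail
      · simp
      · apply List.countP_congr; intro k hk
        have hne : k ≠ x := fun h => absurd (h ▸ hytail k hk) (lt_irrefl x)
        simp [hne]
    have hB : (x :: xs).countP (fun k => !(x :: ys).contains k)
        = xs.countP (fun k => !ys.contains k) := by
      apply pv_countP_cons_tail
      · simp
      · apply List.countP_congr; intro k hk
        have hne : k ≠ x := fun h => absurd (h ▸ hxtail k hk) (lt_irrefl x)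
        simp [hne]
    have hC : (x :: xs).countP (fun k => (x :: ys).contains k && !(pvLookup o k == pvLookup n k))
        = xs.countP (fun k => ys.contains k && !(pvLookup o k == pvLookup n k)) + 1 := by
      apply pv_countP_cons_tail1
      · simp [hneq]
      · apply List.countP_congr; intro k hk
        have hne : k ≠ x := fun h => absurd (h ▸ hxtail k hk) (lt_irrefl x)
        simp [hne]
    rw [hr, hA, hB, hC, Prod.mk.injEq, Prod.mk.injEq]
    refine ⟨rfl, rfl, ?_⟩
    push_cast; ring
  | case6 x xs y ys h1 h2 r hneq ih =>
    have heq : x = y := le_antisymm (le_of_not_gt h2) (le_of_not_gt h1)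
    subst heq
    have hxtail : ∀ k ∈ xs, x < k := (List.pairwise_cons.mp hx).1
    have hytail : ∀ k ∈ ys, x < k := (List.pairwise_cons.mp hy).1
    have hr : r = _ := ih (List.pairwise_cons.mp hx).2 (List.pairwise_cons.mp hy).2
    have hv : (!(pvLookup o x == pvLookup n x)) = false := by
      simpa using hneq
    have hA : (x :: ys).countP (fun k => !(x :: xs).contains k)
        = ys.countP (fun k => !xs.contains k) := by
      apply pv_countP_cons_tail
      · simp
      · apply List.countP_congr; intro k hk
        have hne : k ≠ x := fun h => absurd (h ▸ hytail k hk) (lt_irrefl x)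
        simp [hne]
    have hB : (x :: xs).countP (fun k => !(x :: ys).contains k)
        = xs.countP (fun k => !ys.contains k) := by
      apply pv_countP_cons_tail
      · simp
      · apply List.countP_congr; intro k hk
        have hne : k ≠ x := fun h => absurd (h ▸ hxtail k hk) (lt_irrefl x)
        simp [hne]
    have hC : (x :: xs).countP (fun k => (x :: ys).contains k && !(pvLookup o k == pvLookup n k))
        = xs.countP (fun k => ys.contains k && !(pvLookup o k == pvLookup n k)) := by
      apply pv_countP_cons_tail
      · show ((x :: ys).contains x && !(pvLookup o x == pvLookup n x)) = false
        rw [hv, Bool.and_false]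
      · apply List.countP_congr; intro k hk
        have hne : k ≠ x := fun h => absurd (h ▸ hxtail k hk) (lt_irrefl x)
        simp [hne]
    rw [hr, hA, hB, hC]

theorem pv_countP_eq_length_filter (p : String → Bool) (l : List String) :
    l.countP p = (l.filter p).length := List.countP_eq_length_filter

-- B tests 'count > 0' on an Int counter where A tests nonemptiness of the filtered list
theorem pv_ite_pos (m : Nat) (x : List String) :
    (if ((m : Int) > 0) then x else []) = (if m ≠ 0 then x else []) := by
  by_cases h : m = 0
  · simp [h]
  · simp [h, Int.natCast_pos.mpr (Nat.pos_of_ne_zero h)]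

-- ===== VERDICT (by name: the statement is the Claim_ definition above) =====
theorem compute_change_summary_spec : Claim_equal_compute_change_summary := by
  intro old_tree new_tree _
  unfold Spec_compute_change_summary compute_change_summary compute_change_summary_alt
  match old_tree with
  | none => rfl
  | some o =>
    match new_tree with
    | none => rfl
    | some n =>
      simp only
      rw [pvMergeCount_spec o n _ _
        (PySem.List.sorted_ofList_pairwise_lt (xs := o.map Prod.fst))
        (PySem.List.sorted_ofList_pairwise_lt (xs := n.map Prod.fst))]
      -- membership in the sorted key list = membership in the key set
      have hcn : ∀ k : String,
          (PySem.List.sorted (PySem.Set.ofList (n.map Prod.fst)) (fun x => x) false).contains k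
          = (PySem.Set.ofList (n.map Prod.fst) : List String).contains k := by
        intro k
        simp [List.contains_iff_exists_mem_beq, PySem.List.mem_sorted]
      have hco : ∀ k : String,
          (PySem.List.sorted (PySem.Set.ofList (o.map Prod.fst)) (fun x => x) false).contains k
          = (PySem.Set.ofList (o.map Prod.fst) : List String).contains k := by
        intro k
        simp [List.contains_iff_exists_mem_beq, PySem.List.mem_sorted]
      -- counting over the sorted key list = counting over the key set
      have hpo : ∀ p : String → Bool,
          (PySem.List.sorted (PySem.Set.ofList (o.map Prod.fst)) (fun x => x) false).countP p
          = (PySem.Set.ofList (o.map Prod.fst) : List String).countP p := by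
        intro p
        exact (PySem.List.sorted_perm _ _ _).countP_eq p
      have hpn : ∀ p : String → Bool,
          (PySem.List.sorted (PySem.Set.ofList (n.map Prod.fst)) (fun x => x) false).countP p
          = (PySem.Set.ofList (n.map Prod.fst) : List String).countP p := by
        intro p
        exact (PySem.List.sorted_perm _ _ _).countP_eq p
      simp only [hcn, hco, hpo, hpn]
      have hdiff : ∀ (s t : List String),
          PySem.Set.diff s t = s.filter (fun x => !t.contains x) := fun _ _ => rfl
      have hinter : ∀ (s t : List String),
          PySem.Set.inter s t = s.filter (fun x => t.contains x) := fun _ _ => rfl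
      simp only [hdiff, hinter, List.filter_filter, pv_countP_eq_length_filter, pv_ite_pos]
      have hxc : ∀ a : String,
          ((!(pvLookup o a == pvLookup n a)) &&
            (List.contains (PySem.Set.ofList (n.map Prod.fst)) a))
          = ((List.contains (PySem.Set.ofList (n.map Prod.fst)) a) &&
            !(pvLookup o a == pvLookup n a)) := fun a => Bool.and_comm _ _
      simp only [hxc]
      rfl
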